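-- pv_equiv track=rewrite | github.com/LizzieZhang84/ruiru_clms_thesis | iaa/batch_process_ann.py | find_turn
-- ===== SOURCE A (Python) =====
-- def find_turn(turns, span_start):
--     current_len = 0
--     for i, turn in enumerate(turns):
--         turn_len = len(turn) + turn.count('\n')  # 包括换行符的长度
--         # 分隔符的长度，加上换行符的长度，如果不是第一个turn
--         current_len += turn_len + (16 if i > 0 else 0)  # 分隔符'---------------' + 换行符
--         if current_len >= span_start:
--             return i
--     return -1
-- ===== SOURCE B (Python) =====
-- def find_turn(turns, span_start):
--     # Build the cumulative-length table, then binary-search it (bisect_left).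
--     cum = []
--     total = 0
--     for i, t in enumerate(turns):
--         total += len(t) + t.count('\n') + (16 if i > 0 else 0)
--         cum.append(total)
--     lo, hi = 0, len(cum)
--     while lo < hi:
--         mid = (lo + hi) // 2
--         if cum[mid] < span_start:
--             lo = mid + 1
--         else:
--             hi = mid
--     return lo if lo < len(cum) else -1
-- ===== Notes on version B (the rewrite author's own statement) =====
-- stated objective: alternative
-- what changed: B first builds the cumulative-length prefix array in one pass and then locates the first index whose prefix sum reaches span_start by binary search (hand-rolled bisect_left), instead of A's fused scan-and-compare loop.
import Mathlib
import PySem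

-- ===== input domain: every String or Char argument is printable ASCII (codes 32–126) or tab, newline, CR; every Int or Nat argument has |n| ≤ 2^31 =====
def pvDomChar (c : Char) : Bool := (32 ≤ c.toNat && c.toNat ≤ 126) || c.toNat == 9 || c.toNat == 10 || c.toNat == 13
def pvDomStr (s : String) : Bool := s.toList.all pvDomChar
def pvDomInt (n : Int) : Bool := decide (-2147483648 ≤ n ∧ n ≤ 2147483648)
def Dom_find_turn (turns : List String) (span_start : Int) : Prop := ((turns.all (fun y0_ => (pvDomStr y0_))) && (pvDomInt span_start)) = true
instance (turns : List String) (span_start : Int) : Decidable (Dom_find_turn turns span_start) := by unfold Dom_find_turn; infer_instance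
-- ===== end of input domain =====

-- B builds the cumulative-length prefix table in one pass and then binary-searches it
-- (hand-rolled bisect_left), instead of A's fused scan-and-compare loop (alternative decomposition).

-- ===== PORT A =====
-- A's for-loop over enumerate(turns) with early return, as structural recursion on the enumerated list.
def findTurnGoA (span_start : Int) : List (Int × String) → Int → Int
  | [], _ => -1
  | (i, turn) :: rest, current_len =>
    let turn_len : Int := PySem.Str.len turn + (PySem.Str.count turn "\n" : Int)
    let current_len' := current_len + (turn_len + (if i > 0 then 16 else 0))
    if current_len' ≥ span_start then i else findTurnGoA span_start rest current_len'

def find_turn (turns : List String) (span_start : Int) : Int :=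
  findTurnGoA span_start (PySem.List.enumerate turns) 0

-- ===== PORT B =====
-- first pass of Source B: build the cumulative-length list `cum`
def buildCum : List (Int × String) → Int → List Int
  | [], _ => []
  | (i, t) :: rest, total =>
    let total' := total + (PySem.Str.len t + (PySem.Str.count t "\n" : Int) + (if i > 0 then 16 else 0))
    total' :: buildCum rest total'

-- Source B's while-loop (hand-rolled bisect_left); cum[mid] is always in range, ported as getD.
def bisectLoop (cum : List Int) (x : Int) (lo hi : Nat) : Nat :=
  if h : lo < hi then
    let mid := (lo + hi) / 2
    if cum.getD mid 0 < x then bisectLoop cum x (mid + 1) hi else bisectLoop cum x lo mid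
  else lo
termination_by hi - lo
decreasing_by all_goals omega

def find_turn_alt (turns : List String) (span_start : Int) : Int :=
  let cum := buildCum (PySem.List.enumerate turns) 0
  let lo := bisectLoop cum span_start 0 cum.length
  if lo < cum.length then (lo : Int) else -1

-- ===== PRECONDITION & SPEC =====
def Spec_find_turn (turns : List String) (span_start : Int) (out : Int) : Prop := out = find_turn_alt turns span_start
instance (turns : List String) (span_start : Int) (out : Int) : Decidable (Spec_find_turn turns span_start out) := by unfold Spec_find_turn; infer_instance

-- ===== CLAIM (what is proved, stated in full; the proofs are below) =====
def Claim_equal_find_turn : Prop := ∀ (turns : List String) (span_start : Int), Dom_find_turn turns span_start → Spec_find_turn turns span_start (find_turn turns span_start)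

-- ===== LEMMAS AND PROOFS =====

-- A's loop returns the first enumerate-index whose cumulative length reaches x, i.e. the findIdx
-- position into the prefix-sum table shifted by the starting index k.
theorem findTurnGoA_eq_findIdx (x : Int) (ts : List String) :
    ∀ (k : Int) (cur : Int),
      findTurnGoA x (PySem.List.enumerate ts k) cur =
        (if (buildCum (PySem.List.enumerate ts k) cur).findIdx (fun v => x ≤ v)
              < (buildCum (PySem.List.enumerate ts k) cur).length
         then k + ((buildCum (PySem.List.enumerate ts k) cur).findIdx (fun v => x ≤ v) : Int)
         else -1) := by
  induction ts with
  | nil => intro k cur; simp [PySem.List.enumerate_nil, findTurnGoA, buildCum]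
  | cons t ts ih =>
    intro k cur
    rw [PySem.List.enumerate_cons]
    simp only [findTurnGoA, buildCum, List.findIdx_cons, ge_iff_le, List.length_cons]
    generalize (cur + (PySem.Str.len t + (PySem.Str.count t "\n" : Int) + (if k > 0 then 16 else 0))) = c'
    by_cases hx : x ≤ c'
    · simp [hx]
    · simp only [hx, decide_false, if_false, cond_false]
      rw [ih (k + 1)]
      split_ifs with h1 h2 <;> omega

-- every element of buildCum l t is ≥ the running total t (each contribution is ≥ 0)
theorem buildCum_lower : ∀ (l : List (Int × String)) (t v : Int), v ∈ buildCum l t → t ≤ v := by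
  intro l
  induction l with
  | nil => intro t v hv; simp [buildCum] at hv
  | cons p rest ih =>
    intro t v hv
    obtain ⟨i, s⟩ := p
    have hc : (0 : Int) ≤ PySem.Str.len s + (PySem.Str.count s "\n" : Int) + (if i > 0 then 16 else 0) := by
      have h1 : (0 : Int) ≤ PySem.Str.len s := by simp
      have h2 : (0 : Int) ≤ (if i > (0 : Int) then (16 : Int) else 0) := by split <;> omega
      omega
    simp only [buildCum, List.mem_cons] at hv
    rcases hv with h | h
    · omega
    · have := ih _ _ h
      omega

-- the prefix-sum table is non-decreasing
theorem buildCum_mono : ∀ (l : List (Int × String)) (t : Int), ∀ i j, i ≤ j → j < (buildCum l t).length →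
      (buildCum l t).getD i 0 ≤ (buildCum l t).getD j 0 := by
  intro l
  induction l with
  | nil => intro t i j _ hj; simp [buildCum] at hj
  | cons p rest ih =>
    intro t i j hij hj
    obtain ⟨ix, s⟩ := p
    simp only [buildCum, List.length_cons] at hj ⊢
    set t' : Int := t + (PySem.Str.len s + (PySem.Str.count s "\n" : Int) + (if ix > 0 then 16 else 0)) with ht'
    match i, j with
    | 0, 0 => exact le_refl _
    | 0, j + 1 =>
      have hjl : j < (buildCum rest t').length := by simpa using hj
      simp only [List.getD_cons_zero, List.getD_cons_succ]
      have hmem : (buildCum rest t').getD j 0 ∈ buildCum rest t' := by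
        rw [List.getD_eq_getElem _ 0 hjl]; exact List.getElem_mem hjl
      exact buildCum_lower _ _ _ hmem
    | i + 1, j + 1 =>
      simp only [List.getD_cons_succ]
      exact ih _ i j (by omega) (by simpa using hj)

-- when the search interval is empty, lo itself is the findIdx position
theorem findIdx_eq_of_pivot (cum : List Int) (x : Int) (lo : Nat) (hle : lo ≤ cum.length)
    (h1 : ∀ j, j < lo → cum.getD j 0 < x)
    (h2 : ∀ j, lo ≤ j → j < cum.length → x ≤ cum.getD j 0) :
    cum.findIdx (fun v => x ≤ v) = lo := by
  by_cases hlt : lo < cum.length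
  · rw [List.findIdx_eq hlt]
    refine ⟨by have := h2 lo (le_refl _) hlt; rw [List.getD_eq_getElem _ 0 hlt] at this; simpa using this, ?_⟩
    intro j hj
    have := h1 j hj
    rw [List.getD_eq_getElem _ 0 (by omega)] at this
    simp only [decide_eq_false_iff_not]
    omega
  · have heq2 : lo = cum.length := by omega
    rw [heq2, List.findIdx_eq_length]
    intro v hv
    obtain ⟨j, hjl, rfl⟩ := List.mem_iff_getElem.mp hv
    have := h1 j (by omega)
    rw [List.getD_eq_getElem _ 0 hjl] at this
    simp only [decide_eq_false_iff_not]
    omega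

-- the binary search returns exactly findIdx (position of the first element ≥ x) on a monotone table
theorem bisectLoop_eq_findIdx (cum : List Int) (x : Int)
    (mono : ∀ i j, i ≤ j → j < cum.length → cum.getD i 0 ≤ cum.getD j 0) :
    ∀ n lo hi, hi - lo ≤ n → lo ≤ hi → hi ≤ cum.length →
      (∀ j, j < lo → cum.getD j 0 < x) →
      (∀ j, hi ≤ j → j < cum.length → x ≤ cum.getD j 0) →
      bisectLoop cum x lo hi = cum.findIdx (fun v => x ≤ v) := by
  intro n
  induction n with
  | zero =>
    intro lo hi hn hle hlen h1 h2
    have heq : lo = hi := by omega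
    rw [bisectLoop, dif_neg (by omega)]
    subst heq
    exact (findIdx_eq_of_pivot cum x lo hlen h1 h2).symm
  | succ n ih =>
    intro lo hi hn hle hlen h1 h2
    by_cases h : lo < hi
    · rw [bisectLoop, dif_pos h]
      simp only
      have hmid1 : lo ≤ (lo + hi) / 2 := by omega
      have hmid2 : (lo + hi) / 2 < hi := by omega
      split
      · rename_i hcm
        apply ih ((lo + hi) / 2 + 1) hi (by omega) (by omega) hlen
        · intro j hj
          calc cum.getD j 0 ≤ cum.getD ((lo + hi) / 2) 0 := mono j _ (by omega) (by omega)
            _ < x := hcm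
        · exact h2
      · rename_i hcm
        apply ih lo ((lo + hi) / 2) (by omega) (by omega) (by omega) h1
        intro j hj hjl
        calc x ≤ cum.getD ((lo + hi) / 2) 0 := by omega
          _ ≤ cum.getD j 0 := mono _ j hj hjl
    · rw [bisectLoop, dif_neg h]
      have heq : lo = hi := by omega
      subst heq
      exact (findIdx_eq_of_pivot cum x lo hlen h1 h2).symm

-- ===== VERDICT (by name: the statement is the Claim_ definition above) =====
theorem find_turn_spec : Claim_equal_find_turn := by
  intro turns x _dom
  unfold Spec_find_turn find_turn find_turn_alt
  rw [findTurnGoA_eq_findIdx x turns 0 0]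
  simp only
  rw [bisectLoop_eq_findIdx (buildCum (PySem.List.enumerate turns) 0) x
        (buildCum_mono _ 0) (buildCum (PySem.List.enumerate turns) 0).length 0
        (buildCum (PySem.List.enumerate turns) 0).length (by omega) (by omega) (le_refl _)
        (by omega) (fun j hj hjl => by omega)]
  split <;> simp
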